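-- pv_equiv track=rewrite | github.com/liyongsea/parallel_corpus_mnbvc | alignment/get_labeled_index.py | get_br_indexes_from_alignmap
-- ===== SOURCE A (Python) =====
-- def get_br_indexes_from_alignmap(align_map: dict[int, set[int]]) -> list[int]:
--     br = []
--     for igroups in align_map.values():
--         for i in igroups:
--             if i + 1 in igroups:
--                 br.append(i)
--     br.sort()
--     return br
-- ===== SOURCE B (Python) =====
-- def get_br_indexes_from_alignmap(align_map: dict[int, set[int]]) -> list[int]:
--     # Sort each group once and scan adjacent pairs: in a strictly increasing
--     # sequence, i's successor i+1 is in the group iff it is the very next element.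
--     br = []
--     for g in align_map.values():
--         s = sorted(g)
--         br.extend(a for a, b in zip(s, s[1:]) if b == a + 1)
--     br.sort()
--     return br
-- ===== Notes on version B (the rewrite author's own statement) =====
-- stated objective: alternative
-- what changed: Replaces A's per-element hash-membership test (i+1 in set) with sorting each group and a single adjacency scan of consecutive sorted elements (b == a+1), removing membership queries entirely.
import Mathlib
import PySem

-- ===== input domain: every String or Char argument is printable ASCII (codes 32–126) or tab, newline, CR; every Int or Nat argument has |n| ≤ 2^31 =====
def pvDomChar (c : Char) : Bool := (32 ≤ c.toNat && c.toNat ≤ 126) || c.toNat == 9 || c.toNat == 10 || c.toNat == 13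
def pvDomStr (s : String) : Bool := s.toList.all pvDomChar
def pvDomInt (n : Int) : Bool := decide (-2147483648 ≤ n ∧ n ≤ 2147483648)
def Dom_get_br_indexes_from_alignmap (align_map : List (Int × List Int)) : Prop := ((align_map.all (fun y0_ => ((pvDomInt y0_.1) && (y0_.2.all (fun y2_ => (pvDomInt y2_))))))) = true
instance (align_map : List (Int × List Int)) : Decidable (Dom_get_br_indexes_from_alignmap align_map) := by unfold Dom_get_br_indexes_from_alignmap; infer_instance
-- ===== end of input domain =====

-- B sorts each group once and scans adjacent sorted pairs (b = a+1) instead of A's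
-- per-element membership test; objective: alternative algorithm, same result.

-- ===== PORT A =====
def get_br_indexes_from_alignmap (align_map : List (Int × List Int)) : List Int :=
  let br := align_map.foldl (fun br kv =>
    kv.2.foldl (fun br i => if kv.2.contains (i + 1) then br ++ [i] else br) br) []
  PySem.List.sorted br (fun x => x) false

-- ===== PORT B =====
-- adjacency scan of zip(s, s[1:]): keep a when the next element is a+1
def pvAdjScan : List Int → List Int
  | a :: b :: t => if b = a + 1 then a :: pvAdjScan (b :: t) else pvAdjScan (b :: t)
  | _ => []

def get_br_indexes_from_alignmap_alt (align_map : List (Int × List Int)) : List Int :=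
  let br := align_map.foldl (fun br kv =>
    br ++ pvAdjScan (PySem.List.sorted kv.2 (fun x => x) false)) []
  PySem.List.sorted br (fun x => x) false

-- ===== PRECONDITION & SPEC =====
-- Pre_ states the set-representation invariant of the argument (each group is a
-- Python set, so its List Int encoding holds distinct elements); it excludes no
-- input the Python A is actually called on.
def Pre_get_br_indexes_from_alignmap (align_map : List (Int × List Int)) : Prop :=
  ∀ kv ∈ align_map, kv.2.Nodup
instance (align_map : List (Int × List Int)) : Decidable (Pre_get_br_indexes_from_alignmap align_map) := by unfold Pre_get_br_indexes_from_alignmap; infer_instance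
def pvWitness_get_br_indexes_from_alignmap : (List (Int × List Int)) := [(0, [1, 2, 5]), (3, [7])]

def Spec_get_br_indexes_from_alignmap (align_map : List (Int × List Int)) (out : List Int) : Prop := out = get_br_indexes_from_alignmap_alt align_map
instance (align_map : List (Int × List Int)) (out : List Int) : Decidable (Spec_get_br_indexes_from_alignmap align_map out) := by unfold Spec_get_br_indexes_from_alignmap; infer_instance

-- ===== CLAIM (what is proved, stated in full; the proofs are below) =====
def Claim_equal_get_br_indexes_from_alignmap : Prop := ∀ (align_map : List (Int × List Int)), Dom_get_br_indexes_from_alignmap align_map → Pre_get_br_indexes_from_alignmap align_map → Spec_get_br_indexes_from_alignmap align_map (get_br_indexes_from_alignmap align_map)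

-- ===== LEMMAS AND PROOFS =====

-- On a strictly increasing list, the adjacency scan is exactly the filter
-- "successor present in the list".
theorem pvAdjScan_eq_filter (s : List Int) (hs : s.Pairwise (· < ·)) :
    pvAdjScan s = s.filter (fun a => s.contains (a + 1)) := by
  induction s with
  | nil => rfl
  | cons a t ih =>
    have hat : ∀ y ∈ t, a < y := fun y hy => (List.pairwise_cons.1 hs).1 y hy
    have ht : t.Pairwise (· < ·) := (List.pairwise_cons.1 hs).2
    match t, ht, hat, ih with
    | [], _, _, _ => simp [pvAdjScan]
    | b :: u, ht, hat, ih =>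
      have hab : a < b := hat b (by simp)
      have hbu : ∀ y ∈ u, b < y := fun y hy => (List.pairwise_cons.1 ht).1 y hy
      have htail : pvAdjScan (b :: u) = (b :: u).filter (fun a => (b :: u).contains (a + 1)) := ih ht
      -- the filter over the full list agrees with the filter over the tail, on tail elements
      have hcong : (b :: u).filter (fun x => (a :: b :: u).contains (x + 1))
          = (b :: u).filter (fun x => (b :: u).contains (x + 1)) := by
        apply List.filter_congr
        intro x hx
        have hax : a < x := hat x hx
        have hne : (x + 1 == a) = false := by simp; omega
        rw [List.contains_cons, hne, Bool.false_or]
      by_cases hb : b = a + 1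
      · have hpa : ((a :: b :: u).contains (a + 1)) = true := by simp [hb.symm]
        rw [List.filter_cons_of_pos (by simpa using hpa), hcong, ← htail]
        simp [pvAdjScan, hb]
      · have hnotmem : a + 1 ∉ (a :: b :: u) := by
          simp only [List.mem_cons]
          push Not
          refine ⟨by omega, by omega, fun h => ?_⟩
          have := hbu _ h
          omega
        have hpa : ¬ (((a :: b :: u).contains (a + 1)) = true) := by simpa using hnotmem
        rw [List.filter_cons_of_neg (by simpa using hpa), hcong, ← htail]
        simp [pvAdjScan, hb]

-- A's inner loop appends exactly the filtered elements.
theorem pv_inner_eq (g : List Int) (br : List Int) :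
    g.foldl (fun br i => if g.contains (i + 1) then br ++ [i] else br) br
      = br ++ g.filter (fun i => g.contains (i + 1)) :=
  PySem.List.foldl_append_if_eq_filter _ _ _

-- Per group (Nodup): the adjacency scan of the sorted group is a permutation of
-- A's filtered contribution.
theorem pv_group_perm (g : List Int) (hnd : g.Nodup) :
    (pvAdjScan (PySem.List.sorted g (fun x => x) false)).Perm
      (g.filter (fun i => g.contains (i + 1))) := by
  have hperm : (PySem.List.sorted g (fun x => x) false).Perm g := PySem.List.sorted_perm g _ false
  have hpw : (PySem.List.sorted g (fun x => x) false).Pairwise (· ≤ ·) := by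
    have := PySem.List.sorted_pairwise (xs := g) (key := fun x : Int => x)
    simpa using this
  have hndS : (PySem.List.sorted g (fun x => x) false).Nodup := hperm.nodup_iff.mpr hnd
  have hlt : (PySem.List.sorted g (fun x => x) false).Pairwise (· < ·) := by
    have hne : (PySem.List.sorted g (fun x => x) false).Pairwise (· ≠ ·) := hndS
    exact (List.Pairwise.and hpw hne).imp (fun h => lt_of_le_of_ne h.1 h.2)
  rw [pvAdjScan_eq_filter _ hlt]
  have hfc : (PySem.List.sorted g (fun x => x) false).filter
        (fun a => (PySem.List.sorted g (fun x => x) false).contains (a + 1))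
      = (PySem.List.sorted g (fun x => x) false).filter (fun a => g.contains (a + 1)) := by
    apply List.filter_congr
    intro x _
    simp [hperm.mem_iff]
  rw [hfc]
  exact hperm.filter _

-- The two accumulated lists are permutations of each other.
theorem pv_fold_perm (l : List (Int × List Int)) (h : ∀ kv ∈ l, kv.2.Nodup) :
    ∀ brA brB : List Int, brA.Perm brB →
    (l.foldl (fun br kv =>
        kv.2.foldl (fun br i => if kv.2.contains (i + 1) then br ++ [i] else br) br) brA).Perm
    (l.foldl (fun br kv =>
        br ++ pvAdjScan (PySem.List.sorted kv.2 (fun x => x) false)) brB) := by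
  induction l with
  | nil => intro brA brB hp; simpa using hp
  | cons kv t ih =>
    intro brA brB hp
    simp only [List.foldl_cons]
    apply ih (fun x hx => h x (by simp [hx]))
    rw [pv_inner_eq]
    exact hp.append ((pv_group_perm kv.2 (h kv (by simp))).symm)

theorem get_br_indexes_from_alignmap_spec : Claim_equal_get_br_indexes_from_alignmap := by
  intro align_map _ hpre
  unfold Spec_get_br_indexes_from_alignmap get_br_indexes_from_alignmap get_br_indexes_from_alignmap_alt
  exact (PySem.List.sorted_id_eq_sorted_id_iff_perm _ _).2
    (pv_fold_perm align_map hpre [] [] (List.Perm.refl []))
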